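-- pv_equiv track=rewrite | github.com/hanjiangxue007/Programming | python/codewars/triple_double.py | triple_double
-- ===== SOURCE A (Python) =====
-- def triple_double(num1, num2):
--     num1 = str(num1)
--     num2 = str(num2)
--     nums = ['1','0','2','3','4','5','6','7','8','9','0']
--     for i in nums:
--         if i * 3 in num1 and i * 2 in num2:
--             return 1
--     return 0
-- ===== SOURCE B (Python) =====
-- def triple_double(num1, num2):
--     def run_digits(s, k):
--         found = set()
--         prev = None
--         run = 0
--         for ch in s:
--             run = run + 1 if ch == prev else 1
--             prev = ch
--             if run == k:
--                 found.add(ch)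
--         return found
--     return 1 if run_digits(str(num1), 3) & run_digits(str(num2), 2) else 0
-- ===== Notes on version B (the rewrite author's own statement) =====
-- stated objective: alternative
-- what changed: Replaces A's alphabet-keyed substring searches (for each digit, test 'ddd' in str(num1) and 'dd' in str(num2)) by a single run-length scan of each string that collects the set of digits with a run of length >= 3 (resp. >= 2), answering via set intersection.
import Mathlib
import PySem

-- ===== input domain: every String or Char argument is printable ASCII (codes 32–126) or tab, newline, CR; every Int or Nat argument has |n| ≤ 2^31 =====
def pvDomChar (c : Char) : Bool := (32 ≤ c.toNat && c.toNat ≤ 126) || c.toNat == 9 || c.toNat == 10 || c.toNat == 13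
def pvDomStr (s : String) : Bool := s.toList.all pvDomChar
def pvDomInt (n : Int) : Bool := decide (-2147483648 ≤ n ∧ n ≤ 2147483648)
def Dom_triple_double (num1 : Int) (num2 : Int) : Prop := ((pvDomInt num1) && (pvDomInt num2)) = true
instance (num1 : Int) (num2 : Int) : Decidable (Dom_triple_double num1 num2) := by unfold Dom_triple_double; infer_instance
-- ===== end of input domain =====

-- B replaces A's per-digit substring searches by one run-length scan of each string
-- collecting sets of run-tripled / run-doubled characters, intersected at the end (objective: alternative).

-- ===== PORT A =====
-- the literal list ['1','0','2','3','4','5','6','7','8','9','0'] from A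
def tdNums : List Char := ['1', '0', '2', '3', '4', '5', '6', '7', '8', '9', '0']

-- the for-loop over nums with early return 1, falling through to 0
def tdLoop (s1 s2 : List Char) : List Char → Int
  | [] => 0
  | i :: rest =>
      if PySem.Chars.isIn [i, i, i] s1 && PySem.Chars.isIn [i, i] s2 then 1
      else tdLoop s1 s2 rest

def triple_double (num1 : Int) (num2 : Int) : Int :=
  tdLoop (PySem.Int.toChars num1) (PySem.Int.toChars num2) tdNums

-- ===== PORT B =====
-- run_digits' loop: state (prev, run, found); adds ch to found when its run reaches k
def runsAux (k : Nat) (prev : Option Char) (run : Nat) (found : PySem.Set Char) :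
    List Char → PySem.Set Char
  | [] => found
  | ch :: rest =>
      let run' := if some ch = prev then run + 1 else 1
      let found' := if run' = k then found.add ch else found
      runsAux k (some ch) run' found' rest

def runDigits (s : List Char) (k : Nat) : PySem.Set Char :=
  runsAux k none 0 PySem.Set.empty s

def triple_double_alt (num1 : Int) (num2 : Int) : Int :=
  if PySem.Set.inter (runDigits (PySem.Int.toChars num1) 3)
      (runDigits (PySem.Int.toChars num2) 2) = [] then 0 else 1

-- ===== PRECONDITION & SPEC =====
def Spec_triple_double (num1 : Int) (num2 : Int) (out : Int) : Prop := out = triple_double_alt num1 num2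
instance (num1 : Int) (num2 : Int) (out : Int) : Decidable (Spec_triple_double num1 num2 out) := by unfold Spec_triple_double; infer_instance

-- ===== CLAIM (what is proved, stated in full; the proofs are below) =====
def Claim_equal_triple_double : Prop := ∀ (num1 : Int) (num2 : Int), Dom_triple_double num1 num2 → Spec_triple_double num1 num2 (triple_double num1 num2)

-- ===== LEMMAS AND PROOFS =====

-- a constant run inside a constant block
theorem replicate_infix_replicate {c p : Char} {k r : Nat} (hk : 1 ≤ k) :
    List.replicate k c <:+: List.replicate r p ↔ c = p ∧ k ≤ r := by
  constructor
  · intro h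
    have hsub := h.sublist
    have hmem : c ∈ List.replicate r p :=
      hsub.subset (by simp [List.mem_replicate]; omega)
    have hc : c = p := (List.eq_of_mem_replicate hmem)
    subst hc
    exact ⟨rfl, (List.replicate_sublist_replicate c).mp hsub⟩
  · rintro ⟨rfl, hle⟩
    refine (List.IsPrefix.isInfix ?_)
    rw [show r = k + (r - k) by omega, List.replicate_add]
    exact List.prefix_append _ _
theorem replicate_prefix_bound {p : Char} {l : List Char} (hhd : l.head? ≠ some p) :
    ∀ (r m : Nat), List.replicate m p <+: List.replicate r p ++ l → m ≤ r := by
  intro r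
  induction r with
  | zero =>
      intro m h
      cases m with
      | zero => omega
      | succ m =>
          exfalso
          simp only [List.replicate_succ, List.replicate_zero, List.nil_append] at h
          rcases h with ⟨t, ht⟩
          apply hhd
          rw [← ht]
          rfl
  | succ r ih =>
      intro m h
      cases m with
      | zero => omega
      | succ m =>
          simp only [List.replicate_succ, List.cons_append, List.cons_prefix_cons] at h
          have := ih m h.2
          omega

-- splitting a constant run across a block boundary whose right side starts differently
theorem replicate_infix_split {c p : Char} {k : Nat} {l : List Char}
    (hk : 1 ≤ k) (hhd : l.head? ≠ some p) (r : Nat) :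
    List.replicate k c <:+: List.replicate r p ++ l ↔
      (c = p ∧ k ≤ r) ∨ List.replicate k c <:+: l := by
  constructor
  · intro h
    induction r with
    | zero =>
        right; simpa using h
    | succ r ih =>
        rw [List.replicate_succ, List.cons_append, List.infix_cons_iff] at h
        rcases h with h | h
        · -- prefix of p :: replicate r p ++ l
          left
          cases k with
          | zero => omega
          | succ k' =>
              rw [List.replicate_succ, List.cons_prefix_cons] at h
              obtain ⟨rfl, hpre⟩ := h
              exact ⟨rfl, by have := replicate_prefix_bound hhd r k' hpre; omega⟩
        · rcases ih h with h' | h'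
          · exact Or.inl ⟨h'.1, by omega⟩
          · exact Or.inr h'
  · rintro (⟨rfl, hle⟩ | h)
    · refine List.IsPrefix.isInfix ?_
      rw [show r = k + (r - k) by omega, List.replicate_add, List.append_assoc]
      exact List.prefix_append _ _
    · exact h.trans (List.suffix_append _ _).isInfix

-- the run-scan invariant: membership in the final set = a k-run in (pending block ++ rest)
theorem runsAux_mem {k : Nat} (hk : 1 ≤ k) :
    ∀ (s : List Char) (p : Char) (r : Nat) (found : PySem.Set Char),
      (k ≤ r → p ∈ found) →
      ∀ c, c ∈ runsAux k (some p) r found s ↔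
        c ∈ found ∨ List.replicate k c <:+: List.replicate r p ++ s := by
  intro s
  induction s with
  | nil =>
      intro p r found hinv c
      simp only [runsAux, List.append_nil]
      constructor
      · exact Or.inl
      · rintro (h | h)
        · exact h
        · obtain ⟨rfl, hle⟩ := (replicate_infix_replicate hk).mp h
          exact hinv hle
  | cons d rest ih =>
      intro p r found hinv c
      by_cases hd : d = p
      · subst hd
        simp only [runsAux, if_true]
        have hlist : List.replicate r d ++ d :: rest = List.replicate (r + 1) d ++ rest := by
          rw [List.replicate_succ', List.append_assoc]; rfl
        rw [hlist]
        by_cases hkr : r + 1 = k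
        · rw [if_pos hkr]
          have hIH := ih d (r + 1) (found.add d)
            (fun _ => (PySem.Set.mem_add found d d).mpr (Or.inr rfl)) c
          rw [hIH, PySem.Set.mem_add]
          constructor
          · rintro ((h | rfl) | h)
            · exact Or.inl h
            · right
              refine List.IsPrefix.isInfix ?_
              rw [← hkr]
              exact List.prefix_append _ _
            · exact Or.inr h
          · rintro (h | h)
            · exact Or.inl (Or.inl h)
            · exact Or.inr h
        · rw [if_neg hkr]
          exact ih d (r + 1) found (fun h => hinv (by omega)) c
      · have hne : ¬ (some d = some p) := by simpa using hd
        simp only [runsAux, if_neg hne]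
        have hhd : (d :: rest).head? ≠ some p := by simpa using hd
        rw [replicate_infix_split hk hhd r]
        by_cases hk1 : (1 : Nat) = k
        · rw [if_pos hk1]
          have hIH := ih d 1 (found.add d)
            (fun _ => (PySem.Set.mem_add found d d).mpr (Or.inr rfl)) c
          rw [hIH, PySem.Set.mem_add]
          constructor
          · rintro ((h | rfl) | h)
            · exact Or.inl h
            · right; right
              refine List.IsPrefix.isInfix ?_
              rw [← hk1]
              exact List.prefix_append _ _
            · right; right; simpa using h
          · rintro (h | ⟨rfl, hle⟩ | h)
            · exact Or.inl (Or.inl h)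
            · exact Or.inl (Or.inl (hinv hle))
            · right; simpa using h
        · rw [if_neg hk1]
          have hIH := ih d 1 found (fun h => absurd h (by omega)) c
          rw [hIH]
          constructor
          · rintro (h | h)
            · exact Or.inl h
            · right; right; simpa using h
          · rintro (h | ⟨rfl, hle⟩ | h)
            · exact Or.inl h
            · exact Or.inl (hinv hle)
            · right; simpa using h

-- characterisation of B's scan: c is collected iff a k-run of c occurs in s
theorem mem_runDigits {k : Nat} (hk : 1 ≤ k) (s : List Char) (c : Char) :
    c ∈ runDigits s k ↔ List.replicate k c <:+: s := by
  cases s with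
  | nil =>
      simp only [runDigits, runsAux, PySem.Set.empty]
      constructor
      · intro h; simp at h
      · intro h
        exfalso
        have := h.sublist.length_le
        simp at this
        omega
  | cons d rest =>
      have hne : ¬ (some d = none) := by simp
      simp only [runDigits, runsAux, if_neg hne]
      by_cases hk1 : (1 : Nat) = k
      · rw [if_pos hk1]
        rw [runsAux_mem hk rest d 1 (PySem.Set.empty.add d)
          (fun _ => (PySem.Set.mem_add _ d d).mpr (Or.inr rfl)) c]
        have : List.replicate (1:Nat) d ++ rest = d :: rest := by simp
        rw [this]
        constructor
        · rintro (h | h)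
          · rcases (PySem.Set.mem_add PySem.Set.empty d c).mp h with h' | rfl
            · simp [PySem.Set.empty] at h'
            · rw [← hk1]
              exact List.IsPrefix.isInfix (by simp)
          · exact h
        · exact Or.inr
      · rw [if_neg hk1]
        rw [runsAux_mem hk rest d 1 PySem.Set.empty (fun h => absurd h (by omega)) c]
        have : List.replicate (1:Nat) d ++ rest = d :: rest := by simp
        rw [this]
        constructor
        · rintro (h | h)
          · simp [PySem.Set.empty] at h
          · exact h
        · exact Or.inr

-- A's loop returns 1 exactly when some listed digit is tripled in s1 and doubled in s2
theorem tdLoop_eq (s1 s2 : List Char) (l : List Char) :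
    tdLoop s1 s2 l =
      if ∃ i ∈ l, [i, i, i] <:+: s1 ∧ [i, i] <:+: s2 then 1 else 0 := by
  induction l with
  | nil => simp [tdLoop]
  | cons i rest ih =>
      simp only [tdLoop]
      by_cases h : (PySem.Chars.isIn [i, i, i] s1 && PySem.Chars.isIn [i, i] s2) = true
      · rw [if_pos h]
        rw [Bool.and_eq_true, PySem.Chars.isIn_iff_infix, PySem.Chars.isIn_iff_infix] at h
        rw [if_pos ⟨i, List.mem_cons_self, h.1, h.2⟩]
      · rw [if_neg h, ih]
        congr 1
        simp only [List.mem_cons, eq_iff_iff]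
        constructor
        · rintro ⟨j, hj, hj1⟩; exact ⟨j, Or.inr hj, hj1⟩
        · rintro ⟨j, hj | hj, hj1, hj2⟩
          · subst hj
            exfalso
            apply h
            rw [Bool.and_eq_true, PySem.Chars.isIn_iff_infix, PySem.Chars.isIn_iff_infix]
            exact ⟨hj1, hj2⟩
          · exact ⟨j, hj, hj1, hj2⟩

-- a doubled character of str(n) is a decimal digit
theorem double_isDigit {c : Char} {n : Int}
    (h : [c, c] <:+: PySem.Int.toChars n) : c.isDigit := by
  have hdig : ∀ m : Nat, [c, c] <:+: Nat.toDigits 10 m → c.isDigit := by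
    intro m hm
    have hc : c ∈ Nat.toDigits 10 m := hm.sublist.subset (by simp)
    exact Nat.isDigit_of_mem_toDigits (by norm_num) (by norm_num) hc
  simp only [PySem.Int.toChars] at h
  split at h
  · rw [List.infix_cons_iff] at h
    rcases h with h | h
    · rw [List.cons_prefix_cons] at h
      obtain ⟨hc', hpre⟩ := h
      subst hc'
      have hc : '-' ∈ Nat.toDigits 10 n.natAbs := hpre.sublist.subset (by simp)
      have := Nat.isDigit_of_mem_toDigits (b := 10) (by norm_num) (by norm_num) hc
      exact absurd this (by decide)
    · exact hdig _ h
  · exact hdig _ h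

-- every decimal digit occurs in A's literal list
theorem digit_mem_tdNums {c : Char} (h : c.isDigit) : c ∈ tdNums := by
  simp only [Char.isDigit, Bool.and_eq_true, decide_eq_true_eq] at h
  obtain ⟨h1, h2⟩ := h
  have h1' : 48 ≤ c.toNat := h1
  have h2' : c.toNat ≤ 57 := h2
  interval_cases h : c.toNat <;>
    (rw [show c = Char.ofNat c.toNat from (Char.ofNat_toNat c).symm, h]; decide)

-- ===== VERDICT (by name: the statement is the Claim_ definition above) =====
theorem triple_double_spec : Claim_equal_triple_double := by
  intro num1 num2 _
  unfold Spec_triple_double triple_double triple_double_alt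
  set s1 := PySem.Int.toChars num1 with hs1
  set s2 := PySem.Int.toChars num2 with hs2
  rw [tdLoop_eq]
  by_cases H : ∃ c : Char, [c, c, c] <:+: s1 ∧ [c, c] <:+: s2
  · obtain ⟨c, hc1, hc2⟩ := H
    have hmem : c ∈ PySem.Set.inter (runDigits s1 3) (runDigits s2 2) := by
      rw [PySem.Set.mem_inter, mem_runDigits (by omega), mem_runDigits (by omega)]
      exact ⟨by simpa using hc1, by simpa using hc2⟩
    have hne : ¬ (PySem.Set.inter (runDigits s1 3) (runDigits s2 2) = []) := by
      intro hnil; rw [hnil] at hmem; simp at hmem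
    rw [if_pos ⟨c, digit_mem_tdNums (double_isDigit hc2), hc1, hc2⟩, if_neg hne]
  · have hH : ¬ ∃ i ∈ tdNums, [i, i, i] <:+: s1 ∧ [i, i] <:+: s2 := by
      rintro ⟨i, _, hi1, hi2⟩
      exact H ⟨i, hi1, hi2⟩
    have hnil : PySem.Set.inter (runDigits s1 3) (runDigits s2 2) = [] := by
      rw [List.eq_nil_iff_forall_not_mem]
      intro c hc
      rw [PySem.Set.mem_inter, mem_runDigits (by omega), mem_runDigits (by omega)] at hc
      exact H ⟨c, by simpa using hc.1, by simpa using hc.2⟩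
    rw [if_neg hH, if_pos hnil]
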